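-- pv_equiv track=rewrite | github.com/mohibeyki/extractor | extractor.py | get_for
-- ===== SOURCE A (Python) =====
-- c_malloc = 'malloc(sizeof({}{}) * {});'
--
-- c_for = 'for (i{} = 0; i{} < {}; i{}++)'
--
-- c_rand = 'rand() % {} + {}'
--
-- ranges = {
--     'small': (0, 128),
--     'big': (1024, 2048)
-- }
--
-- def get_random_range(value_range):
--     size = str(ranges[value_range][1] - ranges[value_range][0])
--     return c_rand.format(size, str(ranges[value_range][0]))
--
-- def get_malloc(var_type, dims, size):
--     return c_malloc.format(var_type, "".join(['*' for _ in range(dims - 1)]), size)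
--
-- def get_for(dims, sizes, name, var_type, value_range, level=0):
--     if level == dims:
--         return ''
--     i = str(level)
--     size = str(sizes[level])
--     cmd = c_for.format(i, i, size, i) + '\n{\n'
--
--     cmd += name
--     cmd += '[' + ']['.join(['i' + str(j) for j in range(level + 1)]) + '] = '
--
--     if level + 1 < dims:
--         cmd += get_malloc(var_type, dims - level, sizes[level + 1]) + '\n'
--         cmd += get_for(dims, sizes, name, var_type, value_range, level + 1)
--     else:
--         if value_range == 'output':
--             cmd += '0'
--         else:
--             cmd += get_random_range(value_range)
--         cmd += ';\n'
--
--     cmd += '}\n'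
--     return cmd
-- ===== SOURCE B (Python) =====
-- c_malloc = 'malloc(sizeof({}{}) * {});'
--
-- c_for = 'for (i{} = 0; i{} < {}; i{}++)'
--
-- c_rand = 'rand() % {} + {}'
--
-- ranges = {
--     'small': (0, 128),
--     'big': (1024, 2048)
-- }
--
-- def get_random_range(value_range):
--     size = str(ranges[value_range][1] - ranges[value_range][0])
--     return c_rand.format(size, str(ranges[value_range][0]))
--
-- def get_malloc(var_type, dims, size):
--     return c_malloc.format(var_type, "".join(['*' for _ in range(dims - 1)]), size)
--
-- def get_for(dims, sizes, name, var_type, value_range, level=0):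
--     parts = []
--     for l in range(level, dims):
--         cmd = c_for.format(l, l, sizes[l], l) + '\n{\n'
--         cmd += name + '[' + ']['.join('i' + str(j) for j in range(l + 1)) + '] = '
--         if l + 1 < dims:
--             cmd += get_malloc(var_type, dims - l, sizes[l + 1]) + '\n'
--         elif value_range == 'output':
--             cmd += '0;\n'
--         else:
--             cmd += get_random_range(value_range) + ';\n'
--         parts.append(cmd)
--     parts.append('}\n' * (dims - level))
--     return ''.join(parts)
-- ===== Notes on version B (the rewrite author's own statement) =====
-- stated objective: simpler
-- what changed: B replaces A's linear recursion (one call per dimension, each interleaving its own closing brace) with a single for-loop over range(level, dims) that collects the per-level lines in a list, appends all dims-level closing braces at once, and joins.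
import Mathlib
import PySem

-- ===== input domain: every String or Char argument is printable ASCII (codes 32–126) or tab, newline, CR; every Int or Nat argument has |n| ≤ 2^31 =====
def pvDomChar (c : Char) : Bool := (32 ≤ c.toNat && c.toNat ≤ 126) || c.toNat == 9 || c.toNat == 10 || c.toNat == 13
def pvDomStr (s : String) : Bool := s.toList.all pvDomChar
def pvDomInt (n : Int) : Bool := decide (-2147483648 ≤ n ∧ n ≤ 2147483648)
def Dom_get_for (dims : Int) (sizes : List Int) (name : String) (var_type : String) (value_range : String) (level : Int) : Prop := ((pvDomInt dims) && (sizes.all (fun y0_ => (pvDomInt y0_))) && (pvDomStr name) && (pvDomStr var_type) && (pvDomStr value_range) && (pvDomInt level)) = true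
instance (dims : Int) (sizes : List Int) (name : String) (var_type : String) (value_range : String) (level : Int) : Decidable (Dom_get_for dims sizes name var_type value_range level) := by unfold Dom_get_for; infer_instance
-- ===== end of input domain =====

-- B replaces A's linear recursion by a single loop over the levels that collects the per-level
-- lines and appends all closing braces at once (objective: simpler; return value only, no mutation).

-- ===== PORT A =====
-- module helpers shared by both Python files (c_for / get_malloc / get_random_range / ranges)
-- c_for.format(i, i, size, i)
def gfCFor (i : String) (size : String) : String :=
  "for (i" ++ i ++ " = 0; i" ++ i ++ " < " ++ size ++ "; i" ++ i ++ "++)"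

-- get_malloc(var_type, dims, size) = c_malloc.format(var_type, '*' * (dims-1), size)
def gfMalloc (var_type : String) (dims : Int) (size : Int) : String :=
  "malloc(sizeof(" ++ var_type ++ PySem.Str.join "" (List.replicate (dims - 1).toNat "*")
    ++ ") * " ++ PySem.Int.toStr size ++ ");"

-- the module-level 'ranges' dict
def gfRanges : PySem.Dict String (Int × Int) :=
  PySem.Dict.ofList [("small", (0, 128)), ("big", (1024, 2048))]

-- get_random_range(value_range); none = KeyError on the 'ranges' lookup
def gfRandomRange? (value_range : String) : Option String :=
  match gfRanges.get? value_range with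
  | none => none
  | some (lo, hi) => some ("rand() % " ++ PySem.Int.toStr (hi - lo) ++ " + " ++ PySem.Int.toStr lo)

def get_for (dims : Int) (sizes : List Int) (name : String) (var_type : String) (value_range : String) (level : Int) : String :=
  if level = dims then ""
  else
    match PySem.List.pyGet? sizes level with
    | none => ""  -- IndexError on sizes[level]: excluded by Pre_get_for
    | some sz =>
      let i := PySem.Int.toStr level
      let size := PySem.Int.toStr sz
      let cmd := gfCFor i size ++ "\n{\n"
      let cmd := cmd ++ name
      let cmd := cmd ++ "[" ++ PySem.Str.join "]["
        ((PySem.List.pyRange 0 (level + 1) 1).map (fun j => "i" ++ PySem.Int.toStr j)) ++ "] = "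
      if _h : level + 1 < dims then
        match PySem.List.pyGet? sizes (level + 1) with
        | none => ""  -- IndexError on sizes[level+1]: excluded by Pre_get_for
        | some sz1 =>
          let cmd := cmd ++ gfMalloc var_type (dims - level) sz1 ++ "\n"
          let cmd := cmd ++ get_for dims sizes name var_type value_range (level + 1)
          cmd ++ "}\n"
      else
        if value_range = "output" then cmd ++ "0" ++ ";\n" ++ "}\n"
        else
          match gfRandomRange? value_range with
          | none => ""  -- KeyError in get_random_range: excluded by Pre_get_for
          | some r => cmd ++ r ++ ";\n" ++ "}\n"
  termination_by (dims - level).toNat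
  decreasing_by omega

-- ===== PORT B =====
-- the per-level line built inside Source B's loop body
def gfSeg (dims : Int) (sizes : List Int) (name : String) (var_type : String) (value_range : String) (l : Int) : String :=
  match PySem.List.pyGet? sizes l with
  | none => ""  -- IndexError on sizes[l]: excluded by Pre_get_for
  | some sz =>
    let cmd := gfCFor (PySem.Int.toStr l) (PySem.Int.toStr sz) ++ "\n{\n"
    let cmd := cmd ++ name ++ "[" ++ PySem.Str.join "]["
      ((PySem.List.pyRange 0 (l + 1) 1).map (fun j => "i" ++ PySem.Int.toStr j)) ++ "] = "
    if l + 1 < dims then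
      match PySem.List.pyGet? sizes (l + 1) with
      | none => ""  -- IndexError on sizes[l+1]: excluded by Pre_get_for
      | some sz1 => cmd ++ gfMalloc var_type (dims - l) sz1 ++ "\n"
    else if value_range = "output" then cmd ++ "0;\n"
    else
      match gfRandomRange? value_range with
      | none => ""  -- KeyError in get_random_range: excluded by Pre_get_for
      | some r => cmd ++ r ++ ";\n"

-- parts = per-level lines, then '}\n' * (dims - level), then ''.join(parts)
def get_for_alt (dims : Int) (sizes : List Int) (name : String) (var_type : String) (value_range : String) (level : Int) : String :=
  PySem.Str.join ""
    ((PySem.List.pyRange level dims 1).map (gfSeg dims sizes name var_type value_range)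
      ++ [PySem.Str.join "" (List.replicate (dims - level).toNat "}\n")])

-- ===== PRECONDITION & SPEC =====
-- Pre_ excludes (a) the inputs on which A raises (sizes[l] out of range for some level ≤ l < dims,
-- or a value_range outside {'small','big','output'} — KeyError at the innermost level), and
-- (b) calls with level > dims, where A skips its base case and accidentally emits one loop body
-- for the internal recursion parameter 'level' although no level should remain — B returns '' there.
def Pre_get_for (dims : Int) (sizes : List Int) (name : String) (var_type : String) (value_range : String) (level : Int) : Prop :=
  level ≤ dims ∧
    (level < dims →
      (-(sizes.length : Int) ≤ level ∧ dims ≤ (sizes.length : Int) ∧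
        (value_range = "small" ∨ value_range = "big" ∨ value_range = "output")))
instance (dims : Int) (sizes : List Int) (name : String) (var_type : String) (value_range : String) (level : Int) : Decidable (Pre_get_for dims sizes name var_type value_range level) := by unfold Pre_get_for; infer_instance

def pvWitness_get_for : Int × List Int × String × String × String × Int := (2, [2, 3], "arr", "int", "small", 0)

def Spec_get_for (dims : Int) (sizes : List Int) (name : String) (var_type : String) (value_range : String) (level : Int) (out : String) : Prop := out = get_for_alt dims sizes name var_type value_range level
instance (dims : Int) (sizes : List Int) (name : String) (var_type : String) (value_range : String) (level : Int) (out : String) : Decidable (Spec_get_for dims sizes name var_type value_range level out) := by unfold Spec_get_for; infer_instance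

-- ===== CLAIM (what is proved, stated in full; the proofs are below) =====
def Claim_equal_get_for : Prop := ∀ (dims : Int) (sizes : List Int) (name : String) (var_type : String) (value_range : String) (level : Int), Dom_get_for dims sizes name var_type value_range level → Pre_get_for dims sizes name var_type value_range level → Spec_get_for dims sizes name var_type value_range level (get_for dims sizes name var_type value_range level)

-- ===== LEMMAS AND PROOFS =====
theorem gf_join_nil : PySem.Str.join "" ([] : List String) = "" := rfl

theorem gf_join_cons (x : String) (xs : List String) :
    PySem.Str.join "" (x :: xs) = x ++ PySem.Str.join "" xs := by
  apply String.toList_inj.mp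
  cases xs with
  | nil => simp [PySem.Str.toList_join, PySem.Chars.join, List.intercalate]
  | cons y ys =>
    simp [PySem.Str.toList_join, PySem.Chars.join, List.intercalate, List.intersperse_cons₂]

theorem gf_join_snoc (xs : List String) (c : String) :
    PySem.Str.join "" (xs ++ [c]) = PySem.Str.join "" xs ++ c := by
  induction xs with
  | nil => simp [gf_join_nil, gf_join_cons]
  | cons x t ih => simp [gf_join_cons, ih, String.append_assoc]

theorem gf_closes_comm (m : Nat) :
    PySem.Str.join "" (List.replicate m "}\n") ++ "}\n"
      = "}\n" ++ PySem.Str.join "" (List.replicate m "}\n") := by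
  induction m with
  | zero => rfl
  | succ k ih =>
    rw [List.replicate_succ, gf_join_cons, String.append_assoc, ih]

theorem gf_get?_some (sizes : List Int) (l : Int)
    (h1 : -(sizes.length : Int) ≤ l) (h2 : l < (sizes.length : Int)) :
    ∃ sz, PySem.List.pyGet? sizes l = some sz := by
  cases hg : PySem.List.pyGet? sizes l with
  | some sz => exact ⟨sz, rfl⟩
  | none =>
    rw [PySem.List.pyGet?_eq_none_iff] at hg
    exact absurd ⟨h1, h2⟩ hg

theorem gf_main (sizes : List Int) (name var_type value_range : String) :
    ∀ (n : Nat) (dims level : Int), (dims - level).toNat = n → level ≤ dims →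
      (level < dims → (-(sizes.length : Int) ≤ level ∧ dims ≤ (sizes.length : Int) ∧
        (value_range = "small" ∨ value_range = "big" ∨ value_range = "output"))) →
      get_for dims sizes name var_type value_range level
        = get_for_alt dims sizes name var_type value_range level := by
  intro n
  induction n with
  | zero =>
    intro dims level hn hle _
    have heq : level = dims := by omega
    subst heq
    rw [get_for]
    simp [get_for_alt, PySem.List.pyRange_one_eq_nil (le_refl level), gf_join_cons, gf_join_nil]
  | succ k ih =>
    intro dims level hn hle hgood
    have hlt : level < dims := by omega
    obtain ⟨hlo, hhi, hvr⟩ := hgood hlt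
    obtain ⟨sz, hsz⟩ := gf_get?_some sizes level hlo (by omega)
    -- unfold B one level
    have hB : get_for_alt dims sizes name var_type value_range level
        = gfSeg dims sizes name var_type value_range level
          ++ (get_for_alt dims sizes name var_type value_range (level + 1) ++ "}\n") := by
      rw [get_for_alt, get_for_alt, PySem.List.pyRange_one_cons hlt]
      rw [List.map_cons, List.cons_append, gf_join_cons]
      have hk : (dims - level).toNat = (dims - (level + 1)).toNat + 1 := by omega
      rw [hk, List.replicate_succ, gf_join_cons]
      rw [gf_join_snoc, gf_join_snoc]
      rw [← String.append_assoc, ← gf_closes_comm, String.append_assoc, String.append_assoc]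
    rw [hB]
    by_cases hstep : level + 1 < dims
    · obtain ⟨sz1, hsz1⟩ := gf_get?_some sizes (level + 1) (by omega) (by omega)
      have hrec := ih dims (level + 1) (by omega) (by omega)
        (fun h => ⟨by omega, hhi, hvr⟩)
      rw [get_for]
      simp only [if_neg (by omega : ¬ level = dims), hsz, dif_pos hstep, hsz1]
      rw [hrec]
      rw [gfSeg]
      simp only [hsz, if_pos hstep, hsz1]
      simp [String.append_assoc]
    · have hterm : dims = level + 1 := by omega
      have hBend : get_for_alt dims sizes name var_type value_range (level + 1) = "" := by
        rw [get_for_alt, hterm]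
        simp [PySem.List.pyRange_one_eq_nil (le_refl (level+1)), gf_join_cons, gf_join_nil]
      rw [hBend, get_for, gfSeg]
      simp only [if_neg (by omega : ¬ level = dims), hsz, dif_neg hstep, if_neg hstep]
      rcases hvr with h | h | h <;> subst h
      · have hget : gfRanges.get? "small" = some (0, 128) := rfl
        simp [gfRandomRange?, hget, String.append_assoc]
      · have hget : gfRanges.get? "big" = some (1024, 2048) := rfl
        simp [gfRandomRange?, hget, String.append_assoc]
      · simp [String.append_assoc]

-- ===== VERDICT (by name: the statement is the Claim_ definition above) =====
theorem get_for_spec : Claim_equal_get_for := by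
  intro dims sizes name var_type value_range level _ hpre
  unfold Spec_get_for
  exact gf_main sizes name var_type value_range _ dims level rfl hpre.1 hpre.2
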